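-- pv_equiv track=rewrite | github.com/Ayu-hack/GeeksforGeeks-POTD-Solution | October 2024/triplet_family.py | findTriplet
-- ===== SOURCE A (Python) =====
-- def findTriplet(arr):
--     seen = set(arr)
--
--     for i in range(len(arr)):
--         for j in range(len(arr)):
--             if i != j:
--                 required_sum = arr[i] + arr[j]
--                 if required_sum in seen:
--                     return True
--
--     return False
-- ===== SOURCE B (Python) =====
-- def findTriplet(arr):
--     vals = set(arr)
--     # a pair of two different values whose sum occurs
--     if any(x != y and x + y in vals for x in vals for y in vals):
--         return True
--     # the same value used at two distinct positions
--     return any(arr.count(x) >= 2 and 2 * x in vals for x in vals)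
-- ===== Notes on version B (the rewrite author's own statement) =====
-- stated objective: faster
-- what changed: B scans the set of distinct values (pairs of different values, plus a multiplicity>=2 check for equal addends) instead of A's nested scan over all n^2 index pairs.
import Mathlib
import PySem

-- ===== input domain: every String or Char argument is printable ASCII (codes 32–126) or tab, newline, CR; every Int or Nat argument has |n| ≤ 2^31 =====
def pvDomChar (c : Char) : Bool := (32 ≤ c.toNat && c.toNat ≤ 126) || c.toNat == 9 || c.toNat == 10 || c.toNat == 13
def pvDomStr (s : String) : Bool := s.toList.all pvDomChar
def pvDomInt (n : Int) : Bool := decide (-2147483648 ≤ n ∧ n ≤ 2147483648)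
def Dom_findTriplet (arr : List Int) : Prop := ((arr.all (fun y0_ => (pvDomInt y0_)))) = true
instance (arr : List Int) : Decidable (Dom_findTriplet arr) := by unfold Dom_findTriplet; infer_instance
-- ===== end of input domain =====

-- B replaces A's scan over all index pairs by a scan over distinct values plus a multiplicity check (alternative decomposition).

-- ===== PORT A =====
def findTriplet (arr : List Int) : Bool :=
  let seen := PySem.Set.ofList arr
  (PySem.List.pyRange 0 arr.length 1).any (fun i =>
    (PySem.List.pyRange 0 arr.length 1).any (fun j =>
      i != j &&
        PySem.Set.contains seen (PySem.List.pyGetD arr i 0 + PySem.List.pyGetD arr j 0)))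

-- ===== PORT B =====
def findTriplet_alt (arr : List Int) : Bool :=
  let vals := PySem.Set.ofList arr
  if vals.any (fun x => vals.any (fun y => x != y && PySem.Set.contains vals (x + y))) then
    true
  else
    vals.any (fun x =>
      decide (2 ≤ PySem.List.count arr x) && PySem.Set.contains vals (2 * x))

-- ===== PRECONDITION & SPEC =====
def Spec_findTriplet (arr : List Int) (out : Bool) : Prop := out = findTriplet_alt arr
instance (arr : List Int) (out : Bool) : Decidable (Spec_findTriplet arr out) := by unfold Spec_findTriplet; infer_instance

-- ===== CLAIM (what is proved, stated in full; the proofs are below) =====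
def Claim_equal_findTriplet : Prop := ∀ (arr : List Int), Dom_findTriplet arr → Spec_findTriplet arr (findTriplet arr)

-- ===== LEMMAS AND PROOFS =====

-- A returns true iff two distinct positions have a sum occurring in the list.
lemma findTriplet_iff (arr : List Int) :
    findTriplet arr = true ↔
      ∃ (i j : Fin arr.length), i ≠ j ∧ arr.get i + arr.get j ∈ arr := by
  simp only [findTriplet, List.any_eq_true, PySem.List.mem_pyRange_one,
    Bool.and_eq_true, bne_iff_ne, ne_eq, PySem.Set.contains_iff, PySem.Set.mem_ofList]
  constructor
  · rintro ⟨i, ⟨hi0, hin⟩, j, ⟨hj0, hjn⟩, hij, hmem⟩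
    rw [PySem.List.pyGetD_of_nonneg arr 0 hi0, PySem.List.pyGetD_of_nonneg arr 0 hj0] at hmem
    have hin' : i.toNat < arr.length := by omega
    have hjn' : j.toNat < arr.length := by omega
    refine ⟨⟨i.toNat, hin'⟩, ⟨j.toNat, hjn'⟩, ?_, ?_⟩
    · intro h
      rw [Fin.mk.injEq] at h
      omega
    · rw [List.getD_eq_getElem arr 0 hin', List.getD_eq_getElem arr 0 hjn'] at hmem
      simp only [List.get_eq_getElem]
      exact hmem
  · rintro ⟨i, j, hij, hmem⟩
    refine ⟨(i : Nat), ⟨by omega, by exact_mod_cast i.isLt⟩,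
      (j : Nat), ⟨by omega, by exact_mod_cast j.isLt⟩, ?_, ?_⟩
    · intro h
      exact hij (Fin.ext (by exact_mod_cast h))
    · rw [PySem.List.pyGetD_of_nonneg arr 0 (by omega), PySem.List.pyGetD_of_nonneg arr 0 (by omega)]
      simp only [Int.toNat_natCast]
      rw [List.getD_eq_getElem arr 0 i.isLt, List.getD_eq_getElem arr 0 j.isLt]
      simpa [List.get_eq_getElem] using hmem

-- B's first scan: a pair of two DIFFERENT values whose sum occurs.
lemma altPair (arr : List Int) :
    ((PySem.Set.ofList arr).any (fun x => (PySem.Set.ofList arr).any (fun y =>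
        x != y && PySem.Set.contains (PySem.Set.ofList arr) (x + y)))) = true ↔
      ∃ x ∈ arr, ∃ y ∈ arr, x ≠ y ∧ x + y ∈ arr := by
  simp [List.any_eq_true, Bool.and_eq_true, bne_iff_ne, PySem.Set.mem_ofList]

-- B's second scan: one value of multiplicity ≥ 2 whose double occurs.
lemma altDup (arr : List Int) :
    ((PySem.Set.ofList arr).any (fun x =>
        decide (2 ≤ PySem.List.count arr x) && PySem.Set.contains (PySem.Set.ofList arr) (2 * x))) = true ↔
      ∃ x ∈ arr, 2 ≤ arr.count x ∧ x + x ∈ arr := by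
  simp [List.any_eq_true, Bool.and_eq_true, PySem.Set.mem_ofList, PySem.List.count_eq, two_mul]

-- B returns true iff a pair of different values (or one value of multiplicity ≥ 2) sums into the list.
lemma findTriplet_alt_iff (arr : List Int) :
    findTriplet_alt arr = true ↔
      ((∃ x ∈ arr, ∃ y ∈ arr, x ≠ y ∧ x + y ∈ arr) ∨
       (∃ x ∈ arr, 2 ≤ arr.count x ∧ x + x ∈ arr)) := by
  cases hc : ((PySem.Set.ofList arr).any (fun x => (PySem.Set.ofList arr).any (fun y =>
      x != y && PySem.Set.contains (PySem.Set.ofList arr) (x + y)))) with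
  | true =>
    simp only [findTriplet_alt, hc, if_true]
    exact iff_of_true (by simp) (Or.inl ((altPair arr).1 hc))
  | false =>
    simp only [findTriplet_alt, hc, Bool.false_eq_true, if_false]
    constructor
    · intro h2
      exact Or.inr ((altDup arr).1 h2)
    · rintro (hL | hR)
      · have hcontra := (altPair arr).2 hL
        rw [hc] at hcontra
        simp at hcontra
      · exact (altDup arr).2 hR

-- The two characterisations describe the same inputs.
lemma bridge (arr : List Int) :
    (∃ (i j : Fin arr.length), i ≠ j ∧ arr.get i + arr.get j ∈ arr) ↔
      ((∃ x ∈ arr, ∃ y ∈ arr, x ≠ y ∧ x + y ∈ arr) ∨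
       (∃ x ∈ arr, 2 ≤ arr.count x ∧ x + x ∈ arr)) := by
  constructor
  · rintro ⟨i, j, hij, hmem⟩
    by_cases hxy : arr.get i = arr.get j
    · right
      refine ⟨arr.get i, List.get_mem _ _, ?_, ?_⟩
      · rw [← List.duplicate_iff_two_le_count]
        rcases lt_or_gt_of_ne hij with h | h
        · exact List.duplicate_iff_exists_distinct_get.2 ⟨i, j, h, rfl, hxy⟩
        · exact List.duplicate_iff_exists_distinct_get.2 ⟨j, i, h, hxy, rfl⟩
      · rw [← hxy] at hmem
        exact hmem
    · left
      exact ⟨arr.get i, List.get_mem _ _, arr.get j, List.get_mem _ _, hxy, hmem⟩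
  · rintro (⟨x, hx, y, hy, hxy, hmem⟩ | ⟨x, hx, hcnt, hmem⟩)
    · obtain ⟨i, hi⟩ := List.mem_iff_get.1 hx
      obtain ⟨j, hj⟩ := List.mem_iff_get.1 hy
      refine ⟨i, j, ?_, ?_⟩
      · intro h
        apply hxy
        rw [← hi, ← hj, h]
      · rw [hi, hj]
        exact hmem
    · obtain ⟨n, m, hnm, h1, h2⟩ :=
        List.duplicate_iff_exists_distinct_get.1 (List.duplicate_iff_two_le_count.2 hcnt)
      exact ⟨n, m, Fin.ne_of_lt hnm, by rw [← h1, ← h2]; exact hmem⟩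

-- ===== VERDICT (by name: the statement is the Claim_ definition above) =====
theorem findTriplet_spec : Claim_equal_findTriplet := by
  intro arr _
  unfold Spec_findTriplet
  rw [Bool.eq_iff_iff, findTriplet_iff, findTriplet_alt_iff]
  exact bridge arr
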